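-- pv_equiv track=rewrite | github.com/zhaiyy-zyy/CS_moodle | Y3-CS/Y3-Spring/AIM/Coursework Materials-20250401/aim-sol/3.py | post_process_optimization
-- ===== SOURCE A (Python) =====
-- def post_process_optimization(solution, capacity):
--     """ 后处理优化，尝试合并箱子 """
--     sorted_bins = sorted(solution, key=lambda x: sum(x))
--     new_solution = []
--
--     used = [False] * len(sorted_bins)
--
--     for i in range(len(sorted_bins)):
--         if used[i]:
--             continue
--
--         current_bin = sorted_bins[i].copy()
--         used[i] = True
--
--         for j in range(i+1, len(sorted_bins)):
--             if used[j]: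
--                 continue
--
--             if sum(current_bin) + sum(sorted_bins[j]) <= capacity:
--                 current_bin.extend(sorted_bins[j])
--                 used[j] = True
--
--         new_solution.append(current_bin)
--
--     return new_solution
-- ===== SOURCE B (Python) =====
-- def post_process_optimization(solution, capacity):
--     """Post-process optimization: greedily merge bins under capacity (worklist version)."""
--     remaining = sorted(solution, key=sum)
--     result = []
--     while remaining:
--         current = remaining.pop(0).copy()
--         i = 0
--         while i < len(remaining):
--             if sum(current) + sum(remaining[i]) <= capacity:
--                 current.extend(remaining.pop(i))
--             else:
--                 i += 1
--         result.append(current)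
--     return result
-- ===== Notes on version B (the rewrite author's own statement) =====
-- stated objective: idiomatic
-- what changed: Replaced the index loops with a 'used' boolean array by a shrinking worklist: pop the lightest remaining bin as the seed and pop each later bin that fits, so the skip flags and 'continue' branches disappear.
import Mathlib
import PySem

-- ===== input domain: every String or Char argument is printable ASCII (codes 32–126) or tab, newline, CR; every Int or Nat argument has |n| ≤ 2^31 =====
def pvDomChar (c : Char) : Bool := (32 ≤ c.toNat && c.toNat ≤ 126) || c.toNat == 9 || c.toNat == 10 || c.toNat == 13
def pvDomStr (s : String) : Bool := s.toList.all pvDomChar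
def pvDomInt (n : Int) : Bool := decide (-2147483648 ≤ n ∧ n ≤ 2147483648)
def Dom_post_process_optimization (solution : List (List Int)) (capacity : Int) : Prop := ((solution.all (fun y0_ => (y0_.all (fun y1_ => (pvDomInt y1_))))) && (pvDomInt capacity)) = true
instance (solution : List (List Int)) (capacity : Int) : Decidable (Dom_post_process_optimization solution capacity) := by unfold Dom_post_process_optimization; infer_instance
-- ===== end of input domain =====

-- B replaces A's index loops over a 'used' boolean array by a shrinking worklist
-- (pop the seed bin, pop each later bin that fits); same greedy decisions and order.

-- ===== PORT A =====
-- inner loop: 'for j in range(i+1, len(sorted_bins))' with state (current_bin, used)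
def ppoInner (bins : List (List Int)) (capacity : Int) (j : Nat) (cur : List Int)
    (u : List Bool) : List Int × List Bool :=
  if _h : j < bins.length then
    if u.getD j false then ppoInner bins capacity (j + 1) cur u
    else if cur.sum + (bins.getD j []).sum ≤ capacity then
      ppoInner bins capacity (j + 1) (cur ++ bins.getD j []) (u.set j true)
    else ppoInner bins capacity (j + 1) cur u
  else (cur, u)
termination_by bins.length - j

-- outer loop: 'for i in range(len(sorted_bins))' with state (used, new_solution)
def ppoOuter (bins : List (List Int)) (capacity : Int) (i : Nat) (u : List Bool) :
    List (List Int) :=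
  if _h : i < bins.length then
    if u.getD i false then ppoOuter bins capacity (i + 1) u
    else
      let p := ppoInner bins capacity (i + 1) (bins.getD i []) (u.set i true)
      p.1 :: ppoOuter bins capacity (i + 1) p.2
  else []
termination_by bins.length - i

def post_process_optimization (solution : List (List Int)) (capacity : Int) : List (List Int) :=
  let sorted_bins := PySem.List.sorted solution (fun x => x.sum) false
  ppoOuter sorted_bins capacity 0 (List.replicate sorted_bins.length false)

-- ===== PORT B =====
-- the walk over 'remaining' with manual index i: pop the bins that fit, skip the rest
def ppoAbsorb (capacity : Int) (cur : List Int) : List (List Int) → List Int × List (List Int)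
  | [] => (cur, [])
  | x :: xs =>
    if cur.sum + x.sum ≤ capacity then ppoAbsorb capacity (cur ++ x) xs
    else
      let p := ppoAbsorb capacity cur xs
      (p.1, x :: p.2)

-- the worklist only shrinks (needed for termination of the 'while remaining' loop)
theorem ppoAbsorb_len (capacity : Int) :
    ∀ (xs : List (List Int)) (cur : List Int), (ppoAbsorb capacity cur xs).2.length ≤ xs.length := by
  intro xs
  induction xs with
  | nil => intro cur; simp [ppoAbsorb]
  | cons x xs ih =>
    intro cur
    by_cases h : cur.sum + x.sum ≤ capacity
    · simpa [ppoAbsorb, h] using Nat.le_succ_of_le (ih (cur ++ x))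
    · simpa [ppoAbsorb, h] using ih cur

-- 'while remaining:' — pop the first bin as the seed, absorb what fits, repeat
def ppoLoop (capacity : Int) : List (List Int) → List (List Int)
  | [] => []
  | x :: xs =>
    let p := ppoAbsorb capacity x xs
    p.1 :: ppoLoop capacity p.2
termination_by l => l.length
decreasing_by simpa using Nat.lt_succ_of_le (ppoAbsorb_len capacity xs x)

def post_process_optimization_alt (solution : List (List Int)) (capacity : Int) : List (List Int) :=
  ppoLoop capacity (PySem.List.sorted solution (fun x => x.sum) false)

-- ===== PRECONDITION & SPEC =====
def Spec_post_process_optimization (solution : List (List Int)) (capacity : Int) (out : List (List Int)) : Prop := out = post_process_optimization_alt solution capacity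
instance (solution : List (List Int)) (capacity : Int) (out : List (List Int)) : Decidable (Spec_post_process_optimization solution capacity out) := by unfold Spec_post_process_optimization; infer_instance

-- ===== CLAIM (what is proved, stated in full; the proofs are below) =====
def Claim_equal_post_process_optimization : Prop := ∀ (solution : List (List Int)) (capacity : Int), Dom_post_process_optimization solution capacity → Spec_post_process_optimization solution capacity (post_process_optimization solution capacity)

-- ===== LEMMAS AND PROOFS =====

-- the bins at positions ≥ i that are still unused (A's view of B's worklist)
def ppoUnused (bins : List (List Int)) (u : List Bool) (i : Nat) : List (List Int) :=
  (((bins.drop i).zip (u.drop i)).filter (fun p => !p.2)).map Prod.fst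

theorem ppoUnused_of_le (bins : List (List Int)) (u : List Bool) (i : Nat)
    (h : bins.length ≤ i) : ppoUnused bins u i = [] := by
  simp [ppoUnused, List.drop_eq_nil_of_le h]

theorem ppoUnused_step (bins : List (List Int)) (u : List Bool) (i : Nat)
    (hlen : u.length = bins.length) (h : i < bins.length) :
    ppoUnused bins u i =
      if u.getD i false then ppoUnused bins u (i + 1)
      else bins.getD i [] :: ppoUnused bins u (i + 1) := by
  have hu : i < u.length := by omega
  have hg : u.getD i false = u[i] := by
    simp [List.getD_eq_getElem?_getD, List.getElem?_eq_getElem hu]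
  have hgd : bins.getD i [] = bins[i] := by
    simp [List.getD_eq_getElem?_getD, List.getElem?_eq_getElem h]
  rw [hg, hgd]
  unfold ppoUnused
  rw [List.drop_eq_getElem_cons h, List.drop_eq_getElem_cons hu, List.zip_cons_cons]
  by_cases hb : u[i] = true
  · simp [hb]
  · simp [Bool.eq_false_iff.mpr hb]

theorem ppoUnused_set (bins : List (List Int)) (u : List Bool) (k j : Nat) (b : Bool)
    (h : k < j) : ppoUnused bins (u.set k b) j = ppoUnused bins u j := by
  simp [ppoUnused, List.drop_set_of_lt h]

theorem take_set_self {α : Type} (l : List α) (j : Nat) (a : α) :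
    (l.set j a).take j = l.take j := by
  rw [List.take_set]
  apply List.ext_getElem?
  intro i
  by_cases h : i = j
  · simp [h]
  · simp [List.getElem?_set]
    omega

theorem getD_of_take_eq (l l2 : List Bool) (i j : Nat) (h : i < j)
    (ht : l.take j = l2.take j) : l.getD i false = l2.getD i false := by
  have := congrArg (fun t => t[i]?) ht
  simp only [List.getElem?_take, h, if_pos] at this
  simp [List.getD_eq_getElem?_getD, this]

theorem take_pred {α : Type} (l l2 : List α) (j : Nat)
    (h : l.take (j + 1) = l2.take (j + 1)) : l.take j = l2.take j := by
  have := congrArg (List.take j) h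
  simpa [List.take_take, Nat.min_eq_left (Nat.le_succ j)] using this

theorem ppoInner_spec (bins : List (List Int)) (capacity : Int) :
    ∀ (n j : Nat) (cur : List Int) (u : List Bool), bins.length - j ≤ n →
      u.length = bins.length →
      (ppoInner bins capacity j cur u).1 = (ppoAbsorb capacity cur (ppoUnused bins u j)).1 ∧
      ppoUnused bins (ppoInner bins capacity j cur u).2 j =
        (ppoAbsorb capacity cur (ppoUnused bins u j)).2 ∧
      (ppoInner bins capacity j cur u).2.length = u.length ∧
      (ppoInner bins capacity j cur u).2.take j = u.take j := by
  intro n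
  induction n with
  | zero =>
    intro j cur u hn hlen
    have hj : ¬ j < bins.length := by omega
    rw [ppoInner, dif_neg hj, ppoUnused_of_le bins u j (by omega)]
    refine ⟨rfl, ?_, rfl, rfl⟩
    simp [ppoAbsorb]
  | succ n ih =>
    intro j cur u hn hlen
    by_cases hj : j < bins.length
    · rw [ppoInner, dif_pos hj, ppoUnused_step bins u j hlen hj]
      by_cases hu : u.getD j false
      · rw [if_pos hu, if_pos hu]
        obtain ⟨h1, h2, h3, h4⟩ := ih (j + 1) cur u (by omega) hlen
        refine ⟨h1, ?_, h3, take_pred _ _ j h4⟩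
        rw [ppoUnused_step bins _ j (h3.trans hlen) hj,
          if_pos ((getD_of_take_eq _ _ j (j + 1) (by omega) h4).trans hu), h2]
      · rw [if_neg hu, if_neg hu]
        by_cases hc : cur.sum + (bins.getD j []).sum ≤ capacity
        · rw [if_pos hc]
          have hju : j < u.length := by omega
          have hlen' : (u.set j true).length = bins.length := by simpa using hlen
          obtain ⟨h1, h2, h3, h4⟩ :=
            ih (j + 1) (cur ++ bins.getD j []) (u.set j true) (by omega) hlen'
          rw [ppoUnused_set bins u j (j + 1) true (by omega)] at h1 h2
          have habs : ppoAbsorb capacity cur (bins.getD j [] :: ppoUnused bins u (j + 1)) =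
              ppoAbsorb capacity (cur ++ bins.getD j []) (ppoUnused bins u (j + 1)) := by
            simp only [ppoAbsorb, if_pos hc]
          rw [habs]
          have hset : (u.set j true).getD j false = true := by
            simp [List.getD_eq_getElem?_getD, hju]
          have hlen3 : (ppoInner bins capacity (j + 1) (cur ++ bins.getD j [])
              (u.set j true)).2.length = u.length := by
            rw [h3]; simp
          refine ⟨h1, ?_, hlen3, ?_⟩
          · rw [ppoUnused_step bins _ j (hlen3.trans hlen) hj,
              if_pos ((getD_of_take_eq _ _ j (j + 1) (by omega) h4).trans hset), h2]
          · exact (take_pred _ _ j h4).trans (take_set_self u j true)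
        · rw [if_neg hc]
          obtain ⟨h1, h2, h3, h4⟩ := ih (j + 1) cur u (by omega) hlen
          have habs : ppoAbsorb capacity cur (bins.getD j [] :: ppoUnused bins u (j + 1)) =
              ((ppoAbsorb capacity cur (ppoUnused bins u (j + 1))).1,
                bins.getD j [] :: (ppoAbsorb capacity cur (ppoUnused bins u (j + 1))).2) := by
            simp only [ppoAbsorb, if_neg hc]
          rw [habs]
          refine ⟨h1, ?_, h3, take_pred _ _ j h4⟩
          rw [ppoUnused_step bins _ j (h3.trans hlen) hj,
            if_neg (by rw [getD_of_take_eq _ _ j (j + 1) (by omega) h4]; exact hu), h2]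
    · rw [ppoInner, dif_neg hj, ppoUnused_of_le bins u j (by omega)]
      refine ⟨rfl, ?_, rfl, rfl⟩
      simp [ppoAbsorb]

theorem ppoOuter_spec (bins : List (List Int)) (capacity : Int) :
    ∀ (n i : Nat) (u : List Bool), bins.length - i ≤ n → u.length = bins.length →
      ppoOuter bins capacity i u = ppoLoop capacity (ppoUnused bins u i) := by
  intro n
  induction n with
  | zero =>
    intro i u hn hlen
    have hi : ¬ i < bins.length := by omega
    rw [ppoOuter, dif_neg hi, ppoUnused_of_le bins u i (by omega), ppoLoop]
  | succ n ih =>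
    intro i u hn hlen
    by_cases hi : i < bins.length
    · rw [ppoOuter, dif_pos hi, ppoUnused_step bins u i hlen hi]
      by_cases hu : u.getD i false
      · rw [if_pos hu, if_pos hu]
        exact ih (i + 1) u (by omega) hlen
      · rw [if_neg hu, if_neg hu]
        have hlen' : (u.set i true).length = bins.length := by simpa using hlen
        obtain ⟨h1, h2, h3, _⟩ :=
          ppoInner_spec bins capacity n (i + 1) (bins.getD i []) (u.set i true) (by omega) hlen'
        rw [ppoUnused_set bins u i (i + 1) true (by omega)] at h1 h2
        have hlen3 : (ppoInner bins capacity (i + 1) (bins.getD i [])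
            (u.set i true)).2.length = bins.length := by
          rw [h3]; simpa using hlen
        simp only [ppoLoop]
        rw [h1, ih (i + 1) _ (by omega) hlen3, h2]
    · rw [ppoOuter, dif_neg hi, ppoUnused_of_le bins u i (by omega), ppoLoop]

theorem ppoUnused_replicate (bins : List (List Int)) :
    ppoUnused bins (List.replicate bins.length false) 0 = bins := by
  induction bins with
  | nil => simp [ppoUnused]
  | cons x xs ih =>
    simp only [List.length_cons, List.replicate_succ]
    simpa [ppoUnused, List.filter] using ih

-- ===== VERDICT (by name: the statement is the Claim_ definition above) =====
theorem post_process_optimization_spec : Claim_equal_post_process_optimization := by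
  intro solution capacity _
  unfold Spec_post_process_optimization post_process_optimization post_process_optimization_alt
  rw [ppoOuter_spec _ capacity _ 0 _ (le_refl _) (by simp), ppoUnused_replicate]
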